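-- pv_equiv track=rewrite | github.com/Safaet-Rabbi/Python | Leetcode/670B.py | find_kth_identifier
-- ===== SOURCE A (Python) =====
-- def find_kth_identifier(n, k, identifiers):
--     cumulative_count = [0] * n
--     cumulative_count[0] = 1
--     for i in range(1, n):
--         cumulative_count[i] = cumulative_count[i - 1] + (i + 1)
--
--     robot_index = 0
--     while robot_index < n and cumulative_count[robot_index] < k:
--         robot_index += 1
--
--     if robot_index == 0:
--         return identifiers[0]
--
--     previous_total = cumulative_count[robot_index - 1]
--     position_within_robot = k - previous_total - 1
--     return identifiers[position_within_robot]
-- ===== SOURCE B (Python) =====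
-- import math
--
-- def find_kth_identifier(n, k, identifiers):
--     if k <= 1:
--         return identifiers[0]
--     # smallest r >= 1 with r*(r+1)//2 >= k, by inverting the triangular numbers
--     r = (math.isqrt(8 * k - 7) - 1) // 2 + 1
--     i = min(r - 1, n)
--     return identifiers[k - i * (i + 1) // 2 - 1]
-- ===== Notes on version B (the rewrite author's own statement) =====
-- stated objective: faster
-- what changed: Replaces the O(n) cumulative-count array and linear while-scan with a closed-form inversion of the triangular numbers via math.isqrt, computing the robot index and offset in O(1).
import Mathlib
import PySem

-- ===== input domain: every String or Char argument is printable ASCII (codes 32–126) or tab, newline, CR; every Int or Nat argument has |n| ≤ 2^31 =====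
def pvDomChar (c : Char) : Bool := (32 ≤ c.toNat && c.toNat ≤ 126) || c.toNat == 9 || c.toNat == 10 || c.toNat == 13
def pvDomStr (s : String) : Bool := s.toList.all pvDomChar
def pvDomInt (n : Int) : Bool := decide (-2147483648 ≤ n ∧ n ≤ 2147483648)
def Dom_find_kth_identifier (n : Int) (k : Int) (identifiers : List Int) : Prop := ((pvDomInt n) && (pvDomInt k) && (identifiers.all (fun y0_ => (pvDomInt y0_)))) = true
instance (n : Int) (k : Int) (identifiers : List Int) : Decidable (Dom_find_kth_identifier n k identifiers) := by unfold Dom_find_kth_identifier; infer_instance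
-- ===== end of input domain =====

-- B replaces A's O(n) cumulative array and linear scan by an O(1) closed-form
-- inversion of the triangular numbers via integer square root.

-- ===== PORT A =====
-- the while loop: advance robot_index past every cumulative count < k
def whileA (cum : List Int) (k : Int) (idx : Int) : Int :=
  match cum with
  | [] => idx
  | c :: rest => if c < k then whileA rest k (idx + 1) else idx

def find_kth_identifier (n : Int) (k : Int) (identifiers : List Int) : Int :=
  -- cumulative_count[0] = 1; for i in range(1, n): cum[i] = cum[i-1] + (i+1)
  -- (the list is accumulated front-first and reversed once, so each step reads
  --  cum[i-1] -- the element just written -- at the head; same loop, same values)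
  let cum := ((PySem.List.pyRange 1 n 1).foldl
      (fun c i => (PySem.List.pyGetD c 0 0 + (i + 1)) :: c) [1]).reverse
  let ri := whileA cum k 0
  if ri = 0 then PySem.List.pyGetD identifiers 0 0
  else
    let prev := PySem.List.pyGetD cum (ri - 1) 0
    PySem.List.pyGetD identifiers (k - prev - 1) 0

-- ===== PORT B =====
-- math.isqrt: floor square root by binary search (structural fuel so the kernel can
-- evaluate it; 64 halvings are exact for every n < 2^64, which covers the whole domain Dom)
def isqrtBS (n : Nat) : Nat -> Nat -> Nat -> Nat
  | lo, _, 0 => lo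
  | lo, hi, fuel + 1 =>
    if lo < hi then
      let mid := (lo + hi + 1) / 2
      if mid * mid <= n then isqrtBS n mid hi fuel else isqrtBS n lo (mid - 1) fuel
    else lo

def isqrtN (n : Nat) : Nat := isqrtBS n 0 n 64

def find_kth_identifier_alt (n : Int) (k : Int) (identifiers : List Int) : Int :=
  if k ≤ 1 then PySem.List.pyGetD identifiers 0 0
  else
    -- smallest r ≥ 1 with r*(r+1)//2 ≥ k, by inverting the triangular numbers
    let r : Int := (((isqrtN (8 * k - 7).toNat - 1) / 2 : Nat) : Int) + 1
    let i := min (r - 1) n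
    PySem.List.pyGetD identifiers (k - PySem.Int.floordiv (i * (i + 1)) 2 - 1) 0

-- ===== PRECONDITION & SPEC =====
-- Pre_ admits exactly the inputs where Python A returns: n ≥ 1 (else the write
-- cumulative_count[0] = 1 raises IndexError) and the final index into identifiers
-- is in range (else identifiers[...] raises IndexError).  The index is stated in
-- closed form, min(⌊(⌊√(8k-7)⌋-1)/2⌋, n) being the robot index; isqrtN is the
-- arithmetic function ⌊√·⌋ (not a simulation of either program's loop — it only
-- appears as a helper because Mathlib's Nat.sqrt does not kernel-reduce).
-- The index is always ≥ 0 when n ≥ 1.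
def Pre_find_kth_identifier (n : Int) (k : Int) (identifiers : List Int) : Prop :=
  1 ≤ n ∧
  (if k ≤ 1 then (0 : Int)
   else k - (min (((isqrtN (8 * k - 7).toNat - 1) / 2 : Nat) : Int) n *
             (min (((isqrtN (8 * k - 7).toNat - 1) / 2 : Nat) : Int) n + 1)) / 2 - 1)
    < identifiers.length
instance (n : Int) (k : Int) (identifiers : List Int) : Decidable (Pre_find_kth_identifier n k identifiers) := by unfold Pre_find_kth_identifier; infer_instance

def pvWitness_find_kth_identifier : Int × Int × List Int := (3, 4, [10, 20, 30])

def Spec_find_kth_identifier (n : Int) (k : Int) (identifiers : List Int) (out : Int) : Prop := out = find_kth_identifier_alt n k identifiers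
instance (n : Int) (k : Int) (identifiers : List Int) (out : Int) : Decidable (Spec_find_kth_identifier n k identifiers out) := by unfold Spec_find_kth_identifier; infer_instance

-- ===== CLAIM (what is proved, stated in full; the proofs are below) =====
def Claim_equal_find_kth_identifier : Prop := ∀ (n : Int) (k : Int) (identifiers : List Int), Dom_find_kth_identifier n k identifiers → Pre_find_kth_identifier n k identifiers → Spec_find_kth_identifier n k identifiers (find_kth_identifier n k identifiers)

-- ===== LEMMAS AND PROOFS =====

-- proof-side names for the two ports' subexpressions (definitionally equal to the lets)
def cumL (n : Int) : List Int :=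
  ((PySem.List.pyRange 1 n 1).foldl
    (fun c i => (PySem.List.pyGetD c 0 0 + (i + 1)) :: c) [1]).reverse

def t0I (k : Int) : Int := (((isqrtN (8 * k - 7).toNat - 1) / 2 : Nat) : Int)

lemma A_unfold (n k : Int) (ids : List Int) :
    find_kth_identifier n k ids =
      if whileA (cumL n) k 0 = 0 then PySem.List.pyGetD ids 0 0
      else PySem.List.pyGetD ids
        (k - PySem.List.pyGetD (cumL n) (whileA (cumL n) k 0 - 1) 0 - 1) 0 := rfl

lemma B_unfold (n k : Int) (ids : List Int) :
    find_kth_identifier_alt n k ids =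
      if k ≤ 1 then PySem.List.pyGetD ids 0 0
      else PySem.List.pyGetD ids
        (k - PySem.Int.floordiv (min (t0I k + 1 - 1) n * (min (t0I k + 1 - 1) n + 1)) 2 - 1) 0 := rfl

lemma isqrtBS_spec (n : Nat) : ∀ (fuel lo hi : Nat), lo * lo ≤ n → n < (hi + 1) * (hi + 1) →
    lo ≤ hi → hi - lo < 2 ^ fuel →
    isqrtBS n lo hi fuel * isqrtBS n lo hi fuel ≤ n ∧
      n < (isqrtBS n lo hi fuel + 1) * (isqrtBS n lo hi fuel + 1) := by
  intro fuel
  induction fuel with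
  | zero =>
    intro lo hi h1 h2 h3 h4
    have : lo = hi := by omega
    subst this
    simpa [isqrtBS] using ⟨h1, h2⟩
  | succ f ih =>
    intro lo hi h1 h2 h3 h4
    have hpow : 2 ^ (f + 1) = 2 * 2 ^ f := by ring
    unfold isqrtBS
    by_cases hlh : lo < hi
    · rw [if_pos hlh]
      by_cases hmid : ((lo + hi + 1) / 2) * ((lo + hi + 1) / 2) ≤ n
      · simp only [hmid, if_pos]
        exact ih ((lo + hi + 1) / 2) hi hmid h2 (by omega) (by omega)
      · simp only [hmid, if_false]
        refine ih lo ((lo + hi + 1) / 2 - 1) h1 ?_ (by omega) (by omega)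
        have : (lo + hi + 1) / 2 - 1 + 1 = (lo + hi + 1) / 2 := by omega
        rw [this]
        omega
    · rw [if_neg hlh]
      have hle : lo = hi := by omega
      subst hle
      exact ⟨h1, h2⟩

lemma isqrtN_le_iff (n : Nat) (hn : n < 2 ^ 64) (a : Nat) : a ≤ isqrtN n ↔ a * a ≤ n := by
  have hspec := isqrtBS_spec n 64 0 n (by omega) (by nlinarith) (by omega) (by omega)
  unfold isqrtN
  constructor
  · intro h
    calc a * a ≤ isqrtBS n 0 n 64 * isqrtBS n 0 n 64 := Nat.mul_le_mul h h
    _ ≤ n := hspec.1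
  · intro h
    by_contra hc
    have h1 : isqrtBS n 0 n 64 + 1 ≤ a := by omega
    have := Nat.mul_le_mul h1 h1
    omega

-- t-th triangular number
def triN (t : Nat) : Nat := t * (t + 1) / 2

lemma triN_succ (t : Nat) : triN (t + 1) = triN t + (t + 1) := by
  obtain ⟨q, hq⟩ := Nat.even_mul_succ_self t
  have h1 : (t + 1) * (t + 1 + 1) = (q + q) + 2 * (t + 1) := by rw [← hq]; ring
  unfold triN; omega

lemma triN_pos (t : Nat) : 1 ≤ triN (t + 1) := by
  obtain ⟨q, hq⟩ := Nat.even_mul_succ_self (t + 1)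
  unfold triN
  have : 2 ≤ (t + 1) * (t + 1 + 1) := by nlinarith
  omega

-- the cumulative_count list A builds is exactly [T(1), T(2), …, T(N)]
lemma cumRev_spec : ∀ (N : Nat), 1 ≤ N →
    (PySem.List.pyRange 1 (N : Int) 1).foldl
      (fun c i => (PySem.List.pyGetD c 0 0 + (i + 1)) :: c) [1]
    = ((List.range N).map (fun j => ((triN (j + 1) : Nat) : Int))).reverse := by
  intro N hN
  induction N with
  | zero => omega
  | succ M ih =>
    rcases Nat.eq_or_lt_of_le hN with h1 | h1
    · simp [PySem.List.pyRange_one_eq_nil, ← h1, List.range_succ, triN]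
    · have hM : 1 ≤ M := by omega
      have hcast : ((M + 1 : Nat) : Int) = (M : Int) + 1 := by push_cast; ring
      rw [hcast, PySem.List.pyRange_one_succ_right (by exact_mod_cast hM),
          List.foldl_append, ih hM]
      obtain ⟨P, rfl⟩ : ∃ P, M = P + 1 := ⟨M - 1, by omega⟩
      rw [List.range_succ, List.map_append, List.reverse_append]
      simp only [List.foldl_cons, List.foldl_nil, List.map_cons, List.map_nil,
        List.reverse_cons, List.reverse_nil, List.nil_append, List.cons_append,
        PySem.List.pyGetD_zero_cons]
      rw [List.range_succ (n := P + 1), List.map_append, List.reverse_append]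
      simp only [List.map_cons, List.map_nil, List.reverse_cons, List.reverse_nil,
        List.nil_append, List.cons_append]
      congr 1
      · rw [triN_succ (P + 1)]
        push_cast
        ring
      · rw [List.range_succ, List.map_append, List.reverse_append]
        simp

lemma cum_spec : ∀ (N : Nat), 1 ≤ N →
    cumL (N : Int) = (List.range N).map (fun j => ((triN (j + 1) : Nat) : Int)) := by
  intro N hN
  unfold cumL
  rw [cumRev_spec N hN, List.reverse_reverse]

-- the while loop over [f 0, …, f (N-1)] with threshold c : it stops at min N c
lemma whileA_spec (k : Int) : ∀ (N : Nat) (f : Nat → Int) (c : Nat) (idx : Int),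
    (∀ j, f j < k ↔ j < c) →
    whileA ((List.range N).map f) k idx = idx + ((min N c : Nat) : Int) := by
  intro N
  induction N with
  | zero => intro f c idx h; simp [whileA]
  | succ M ih =>
    intro f c idx h
    rw [List.range_succ_eq_map, List.map_cons, List.map_map]
    show whileA (f 0 :: _) k idx = _
    cases c with
    | zero =>
      have h0 : ¬ f 0 < k := by rw [h]; omega
      simp [whileA, h0]
    | succ c' =>
      have h0 : f 0 < k := by rw [h]; omega
      have hrec := ih (f ∘ Nat.succ) c' (idx + 1)
        (by intro j; simp only [Function.comp_apply]; rw [h]; omega)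
      simp only [whileA, h0, if_pos]
      rw [hrec]
      have : min (M + 1) (c' + 1) = min M c' + 1 := by omega
      rw [this]
      push_cast
      ring

-- the closed-form threshold: T(j+1) < k  ↔  j < (⌊√(8k-7)⌋ - 1)/2   (k ≥ 2)
lemma thresh (k : Int) (hk : 2 ≤ k) (hB : (8 * k - 7).toNat < 2 ^ 64) (j : Nat) :
    ((triN (j + 1) : Nat) : Int) < k ↔ j < (isqrtN (8 * k - 7).toNat - 1) / 2 := by
  have hs : 2 * (j + 1) + 1 ≤ isqrtN (8 * k - 7).toNat
      ↔ (2 * (j + 1) + 1) * (2 * (j + 1) + 1) ≤ (8 * k - 7).toNat :=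
    isqrtN_le_iff _ hB _
  obtain ⟨q, hq⟩ := Nat.even_mul_succ_self (j + 1)
  have hsq : (2 * (j + 1) + 1) * (2 * (j + 1) + 1) = 4 * (q + q) + 1 := by
    rw [← hq]; ring
  have htri : triN (j + 1) = q := by unfold triN; omega
  rw [hsq] at hs
  rw [htri]
  omega

-- t0 ≥ 1 for k ≥ 2
lemma t0_pos (k : Int) (hk : 2 ≤ k) (hB : (8 * k - 7).toNat < 2 ^ 64) :
    1 ≤ (isqrtN (8 * k - 7).toNat - 1) / 2 := by
  have h9 : 9 ≤ (8 * k - 7).toNat := by omega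
  have : 3 ≤ isqrtN (8 * k - 7).toNat := (isqrtN_le_iff _ hB 3).mpr (by omega)
  omega

-- ===== VERDICT (by name: the statement is the Claim_ definition above) =====
theorem find_kth_identifier_spec : Claim_equal_find_kth_identifier := by
  intro n k ids hdom hpre
  have hkB : k ≤ 2147483648 := by
    simp only [Dom_find_kth_identifier, pvDomInt, Bool.and_eq_true, decide_eq_true_eq] at hdom
    exact hdom.1.2.2
  have hB : (8 * k - 7).toNat < 2 ^ 64 := by omega
  obtain ⟨hn, _⟩ := hpre
  unfold Spec_find_kth_identifier
  rw [A_unfold, B_unfold]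
  set N := n.toNat with hNdef
  have hN : 1 ≤ N := by omega
  have hnN : (N : Int) = n := by omega
  rw [← hnN, cum_spec N hN]
  by_cases hk : k ≤ 1
  · -- every T(t) ≥ 1 ≥ k, so the loop stops at index 0
    have hth : ∀ j : Nat, ((triN (j + 1) : Nat) : Int) < k ↔ j < 0 := by
      intro j
      have h1 := triN_pos j
      constructor
      · intro h
        exfalso
        have : (1 : Int) ≤ ((triN (j + 1) : Nat) : Int) := by exact_mod_cast h1
        omega
      · omega
    rw [whileA_spec k N _ 0 0 hth]
    simp [hk]
  · have hk2 : 2 ≤ k := by omega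
    set t0 := (isqrtN (8 * k - 7).toNat - 1) / 2 with ht0def
    have hth : ∀ j : Nat, ((triN (j + 1) : Nat) : Int) < k ↔ j < t0 := fun j => thresh k hk2 hB j
    rw [whileA_spec k N _ t0 0 hth]
    have ht0 : 1 ≤ t0 := t0_pos k hk2 hB
    set M := min N t0 with hMdef
    have hM : 1 ≤ M := by omega
    have hri : (0 : Int) + ((M : Nat) : Int) ≠ 0 := by
      have : (1 : Int) ≤ ((M : Nat) : Int) := by exact_mod_cast hM
      omega
    rw [if_neg hri, if_neg hk]
    -- prev = T(M)
    have hget : PySem.List.pyGetD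
        ((List.range N).map (fun j => ((triN (j + 1) : Nat) : Int))) (0 + ((M : Nat) : Int) - 1) 0
        = ((triN M : Nat) : Int) := by
      rw [PySem.List.pyGetD_eq_getElem _ 0 (by omega)
          (by simp only [List.length_map, List.length_range]; omega)]
      have ht : ((0 : Int) + (M : Int) - 1).toNat = M - 1 := by omega
      simp only [ht, List.getElem_map, List.getElem_range, Nat.sub_add_cancel hM]
    rw [hget]
    -- B's index equals A's index
    have hi : min (t0I k + 1 - 1) ((N : Nat) : Int) = ((M : Nat) : Int) := by
      unfold t0I
      rw [← ht0def]
      omega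
    rw [hi]
    have hfd : PySem.Int.floordiv (((M : Nat) : Int) * (((M : Nat) : Int) + 1)) 2
        = ((triN M : Nat) : Int) := by
      rw [PySem.Int.floordiv_eq_ediv_of_pos (by omega)]
      have hc : (((M : Nat) : Int) * (((M : Nat) : Int) + 1)) = ((M * (M + 1) : Nat) : Int) := by
        push_cast; ring
      rw [hc]
      unfold triN
      exact (Nat.ToInt.div_congr rfl rfl).symm
    rw [hfd]
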